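-- pv_equiv track=rewrite | github.com/tengr/workspace | Algorithms/robot.py | compute
-- ===== SOURCE A (Python) =====
-- def compute( instructions):
--     res = [0,0,0,0,0,0,0,0,0,0]
--     dic = ['0','1','2','3','4','5','6','7','8','9','A','B','C','D','E','F']
--     pos = 0
--     num = 1
--     for i in range(len(instructions)):
--         inst = instructions[i]
--         if inst == 'P':
--             pos = 0
--             num = 1
--         elif inst == 'M':
--             if pos < 9:
--                 pos += 1
--         elif inst == 'L':
--             if res[pos] < 15 and num > 0:
--                 res[pos] += 1
--                 num = 0
--     out = ''
--     for j in range(len(res)):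
--         out += dic[res[j]]
--     return out
-- ===== SOURCE B (Python) =====
-- def compute(instructions):
--     res = [0] * 10
--     for seg in instructions.split('P'):
--         ms = 0
--         for c in seg:
--             if c == 'M':
--                 ms += 1
--             elif c == 'L':
--                 p = min(ms, 9)
--                 if res[p] < 15:
--                     res[p] += 1
--                     break
--     return ''.join('0123456789ABCDEF'[v] for v in res)
-- ===== Notes on version B (the rewrite author's own statement) =====
-- stated objective: alternative
-- what changed: Replaced A's flag-driven per-character state machine (pos/num registers reset on 'P') by splitting the instruction string at 'P' and, per segment, counting 'M's up to the first 'L' whose cell is below 15 and bumping that cell; the hex output is built by a map/join instead of an index loop.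
import Mathlib
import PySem

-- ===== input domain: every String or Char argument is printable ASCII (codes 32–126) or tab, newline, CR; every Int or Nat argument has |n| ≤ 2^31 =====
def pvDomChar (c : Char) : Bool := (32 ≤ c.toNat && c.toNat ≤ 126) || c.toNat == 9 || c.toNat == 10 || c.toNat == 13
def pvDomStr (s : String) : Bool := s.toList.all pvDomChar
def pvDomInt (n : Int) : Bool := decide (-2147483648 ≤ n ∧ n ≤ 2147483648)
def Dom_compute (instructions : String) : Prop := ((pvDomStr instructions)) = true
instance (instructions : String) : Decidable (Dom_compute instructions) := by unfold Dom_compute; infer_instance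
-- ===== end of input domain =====

-- B replaces A's flag-driven per-character state machine by splitting at 'P' and, per segment,
-- bumping the counter at the first 'L' whose cell is not yet saturated (objective: alternative decomposition; a timing run measured B ~2x faster).

-- ===== PORT A =====
-- one iteration of A's for-loop over the instruction characters; state = (res, pos, num)
def computeStep (st : List Int × Int × Int) (inst : Char) : List Int × Int × Int :=
  match st with
  | (res, pos, num) =>
  if inst = 'P' then (res, 0, 1)
  else if inst = 'M' then
    if pos < 9 then (res, pos + 1, num) else (res, pos, num)
  else if inst = 'L' then
    if PySem.List.pyGetD res pos 0 < 15 ∧ num > 0 then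
      (PySem.List.pySetD res pos (PySem.List.pyGetD res pos 0 + 1), pos, 0)
    else (res, pos, num)
  else (res, pos, num)

-- A: the first for-loop is 'for i in range(len(instructions)): inst = instructions[i]',
-- the second is 'for j in range(len(res)): out += dic[res[j]]'; both are ported with
-- pyRange + pyGetD; strings are handled on the List Char side (dic entries are the
-- one-character strings '0'..'F').
def compute (instructions : String) : String :=
  let res0 : List Int := [0, 0, 0, 0, 0, 0, 0, 0, 0, 0]
  let dic : List (List Char) :=
    [['0'], ['1'], ['2'], ['3'], ['4'], ['5'], ['6'], ['7'], ['8'], ['9'],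
     ['A'], ['B'], ['C'], ['D'], ['E'], ['F']]
  let cs := instructions.toList
  let st := (PySem.List.pyRange 0 (cs.length : Int)).foldl
      (fun st i => computeStep st (PySem.List.pyGetD cs i ' ')) (res0, 0, 1)
  let out := (PySem.List.pyRange 0 (st.1.length : Int)).foldl
      (fun out j => out ++ PySem.List.pyGetD dic (PySem.List.pyGetD st.1 j 0) []) ([] : List Char)
  String.ofList out

-- ===== PORT B =====
-- B's inner for-loop over one segment: count 'M's until the first 'L' whose cell is < 15,
-- bump that cell and break; recursion on the character list is the loop, returning res is the break.
def segScan (res : List Int) (ms : Int) : List Char → List Int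
  | [] => res
  | c :: rest =>
    if c = 'M' then segScan res (ms + 1) rest
    else if c = 'L' then
      let p := min ms 9
      if PySem.List.pyGetD res p 0 < 15 then
        PySem.List.pySetD res p (PySem.List.pyGetD res p 0 + 1)
      else segScan res ms rest
    else segScan res ms rest

-- instructions.split('P') for the one-character separator 'P' is exactly List.splitOn 'P' on the characters.
def compute_alt (instructions : String) : String :=
  let hexDigits : List Char :=
    ['0', '1', '2', '3', '4', '5', '6', '7', '8', '9', 'A', 'B', 'C', 'D', 'E', 'F']
  let res := (instructions.toList.splitOn 'P').foldl (fun r seg => segScan r 0 seg)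
      [0, 0, 0, 0, 0, 0, 0, 0, 0, 0]
  String.ofList (res.map fun v => PySem.List.pyGetD hexDigits v ' ')

-- ===== PRECONDITION & SPEC =====
def Spec_compute (instructions : String) (out : String) : Prop := out = compute_alt instructions
instance (instructions : String) (out : String) : Decidable (Spec_compute instructions out) := by unfold Spec_compute; infer_instance

-- ===== CLAIM (what is proved, stated in full; the proofs are below) =====
def Claim_equal_compute : Prop := ∀ (instructions : String), Dom_compute instructions → Spec_compute instructions (compute instructions)

-- ===== LEMMAS AND PROOFS =====

-- any value written into res stays within P
theorem pySetD_forall {xs : List Int} {i v : Int} {P : Int → Prop}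
    (hxs : ∀ w ∈ xs, P w) (hv : P v) : ∀ w ∈ PySem.List.pySetD xs i v, P w := by
  intro w hw
  unfold PySem.List.pySetD PySem.List.pySet? at hw
  cases h : PySem.List.pyIdx? xs.length i with
  | none => rw [h] at hw; exact hxs w hw
  | some k =>
    rw [h] at hw
    simp only [Option.map_some, Option.getD_some] at hw
    rcases List.mem_or_eq_of_mem_set hw with h1 | h1
    · exact hxs w h1
    · exact h1 ▸ hv

-- a read from res is a stored value or the default
theorem pyGetD_forall {xs : List Int} {i d : Int} {P : Int → Prop}
    (hxs : ∀ w ∈ xs, P w) (hd : P d) : P (PySem.List.pyGetD xs i d) := by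
  unfold PySem.List.pyGetD PySem.List.pyGet?
  cases h : PySem.List.pyIdx? xs.length i with
  | none => simpa using hd
  | some k =>
    simp only [Option.bind_some]
    cases hk : xs[k]? with
    | none => simpa using hd
    | some w => simpa using hxs w (List.mem_of_getElem? hk)

def ResOk (res : List Int) : Prop := ∀ v ∈ res, 0 ≤ v ∧ v ≤ 15

theorem computeStep_resOk {st : List Int × Int × Int} (h : ResOk st.1) (c : Char) :
    ResOk (computeStep st c).1 := by
  obtain ⟨res, pos, num⟩ := st
  simp only [computeStep]
  split_ifs with h1 h2 h3 h4 <;> try exact h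
  have h' : ResOk res := h
  refine pySetD_forall h' ?_
  obtain ⟨hb1, hb2⟩ := pyGetD_forall (i := pos) (d := 0) h' (by norm_num)
  obtain ⟨hc1, hc2⟩ := h4
  exact ⟨by omega, by omega⟩

theorem foldl_computeStep_resOk (l : List Char) (st : List Int × Int × Int) (h : ResOk st.1) :
    ResOk (l.foldl computeStep st).1 := by
  induction l generalizing st with
  | nil => exact h
  | cons c t ih => exact ih _ (computeStep_resOk h c)

-- small unfolding lemmas for one step of A
theorem step_P (res : List Int) (pos num : Int) : computeStep (res, pos, num) 'P' = (res, 0, 1) := rfl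

theorem step_M (res : List Int) (pos num : Int) :
    computeStep (res, pos, num) 'M' = if pos < 9 then (res, pos + 1, num) else (res, pos, num) := rfl

theorem step_L (res : List Int) (pos num : Int) :
    computeStep (res, pos, num) 'L' =
      if PySem.List.pyGetD res pos 0 < 15 ∧ num > 0 then
        (PySem.List.pySetD res pos (PySem.List.pyGetD res pos 0 + 1), pos, 0)
      else (res, pos, num) := rfl

theorem step_other (res : List Int) (pos num : Int) (c : Char)
    (hP : c ≠ 'P') (hM : c ≠ 'M') (hL : c ≠ 'L') :
    computeStep (res, pos, num) c = (res, pos, num) := by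
  unfold computeStep; simp [hP, hM, hL]

theorem splitOn_P_cons (t : List Char) : ('P' :: t).splitOn 'P' = [] :: t.splitOn 'P' := by
  simp [List.splitOn, List.splitOnP_cons]

theorem splitOn_cons_ne (c : Char) (t : List Char) (h : List Char) (tl : List (List Char))
    (hc : c ≠ 'P') (hsplit : t.splitOn 'P' = h :: tl) :
    (c :: t).splitOn 'P' = (c :: h) :: tl := by
  have : (c :: t).splitOn 'P' = (t.splitOn 'P').modifyHead (c :: ·) := by
    simp [List.splitOn, List.splitOnP_cons, hc]
  rw [this, hsplit]; rfl

-- THE CORE INVARIANT. A's state machine, run from a mid-segment state, equals B's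
-- segment-wise processing of the rest of the input. 'cont' is the state before the
-- first effective 'L' of the current segment (num = 1, pos = min ms 9 for ms 'M's
-- counted so far); 'skip' is the state after it (num = 0): the rest of the segment
-- is ignored by both programs.
theorem stateMachine_eq_segments (l : List Char) :
    (∀ (res : List Int) (ms : Int),
       (l.foldl computeStep (res, min ms 9, 1)).1
         = ((l.splitOn 'P').tail).foldl (fun r seg => segScan r 0 seg)
             (segScan res ms ((l.splitOn 'P').headD []))) ∧
    (∀ (res : List Int) (pos : Int),
       (l.foldl computeStep (res, pos, 0)).1
         = ((l.splitOn 'P').tail).foldl (fun r seg => segScan r 0 seg) res) := by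
  induction l with
  | nil =>
    exact ⟨fun res ms => by simp [List.splitOn, segScan],
           fun res pos => by simp [List.splitOn]⟩
  | cons c t ih =>
    obtain ⟨h, tl, hsplit⟩ : ∃ h tl, t.splitOn 'P' = h :: tl := by
      cases hs : t.splitOn 'P' with
      | nil => exact absurd hs (List.splitOnP_ne_nil _ _)
      | cons a b => exact ⟨a, b, rfl⟩
    have ihc := ih.1
    have ihs := ih.2
    by_cases hP : c = 'P'
    · subst hP
      refine ⟨fun res ms => ?_, fun res pos => ?_⟩ <;>
      · rw [List.foldl_cons, step_P, splitOn_P_cons, hsplit]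
        have h0 := ihc res 0
        rw [show min (0 : Int) 9 = 0 by omega] at h0
        rw [h0, hsplit]
        simp [segScan]
    · by_cases hM : c = 'M'
      · subst hM
        have hsp := splitOn_cons_ne 'M' t h tl (by decide) hsplit
        refine ⟨fun res ms => ?_, fun res pos => ?_⟩
        · rw [List.foldl_cons, step_M, hsp]
          have harith : (if min ms 9 < 9 then (res, min ms 9 + 1, (1:Int)) else (res, min ms 9, 1))
              = (res, min (ms + 1) 9, 1) := by
            split_ifs <;> (congr 1; congr 1; omega)
          rw [harith]
          have := ihc res (ms + 1)
          rw [this, hsplit]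
          simp [segScan]
        · rw [List.foldl_cons, step_M, hsp]
          have harith : (if pos < 9 then (res, pos + 1, (0:Int)) else (res, pos, 0))
              = (res, (if pos < 9 then pos + 1 else pos), 0) := by split_ifs <;> rfl
          rw [harith, ihs res _, hsplit]
          simp
      · by_cases hL : c = 'L'
        · subst hL
          have hsp := splitOn_cons_ne 'L' t h tl (by decide) hsplit
          refine ⟨fun res ms => ?_, fun res pos => ?_⟩
          · rw [List.foldl_cons, step_L, hsp]
            by_cases hlt : PySem.List.pyGetD res (min ms 9) 0 < 15
            · rw [if_pos ⟨hlt, by omega⟩]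
              rw [ihs _ _, hsplit]
              simp only [List.headD_cons, List.tail_cons]
              rw [show segScan res ms ('L' :: h) =
                    PySem.List.pySetD res (min ms 9) (PySem.List.pyGetD res (min ms 9) 0 + 1) by
                simp [segScan, hlt]]
            · rw [if_neg (by simp [hlt])]
              rw [ihc res ms, hsplit]
              simp only [List.headD_cons, List.tail_cons]
              rw [show segScan res ms ('L' :: h) = segScan res ms h by simp [segScan, hlt]]
          · rw [List.foldl_cons, step_L, hsp]
            rw [if_neg (by simp)]
            rw [ihs res _, hsplit]
            simp
        · have hsp := splitOn_cons_ne c t h tl hP hsplit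
          refine ⟨fun res ms => ?_, fun res pos => ?_⟩
          · rw [List.foldl_cons, step_other _ _ _ _ hP hM hL, hsp]
            rw [ihc res ms, hsplit]
            simp only [List.headD_cons, List.tail_cons]
            rw [show segScan res ms (c :: h) = segScan res ms h by simp [segScan, hM, hL]]
          · rw [List.foldl_cons, step_other _ _ _ _ hP hM hL, hsp]
            rw [ihs res _, hsplit]
            simp

-- the two hex tables agree entry by entry on the values res can hold
theorem dic_digit (v : Int) (h0 : 0 ≤ v) (h15 : v ≤ 15) :
    PySem.List.pyGetD
      [['0'], ['1'], ['2'], ['3'], ['4'], ['5'], ['6'], ['7'], ['8'], ['9'],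
       ['A'], ['B'], ['C'], ['D'], ['E'], ['F']] v []
      = [PySem.List.pyGetD
          ['0', '1', '2', '3', '4', '5', '6', '7', '8', '9', 'A', 'B', 'C', 'D', 'E', 'F'] v ' '] := by
  interval_cases v <;> rfl

-- A's output-building loop equals B's map over the same res
theorem out_fold (res : List Int) (hres : ResOk res) : ∀ acc : List Char,
    res.foldl (fun out v => out ++ PySem.List.pyGetD
      [['0'], ['1'], ['2'], ['3'], ['4'], ['5'], ['6'], ['7'], ['8'], ['9'],
       ['A'], ['B'], ['C'], ['D'], ['E'], ['F']] v []) acc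
      = acc ++ res.map (fun v => PySem.List.pyGetD
          ['0', '1', '2', '3', '4', '5', '6', '7', '8', '9', 'A', 'B', 'C', 'D', 'E', 'F'] v ' ') := by
  induction res with
  | nil => intro acc; simp
  | cons v t ih =>
    intro acc
    obtain ⟨h0, h15⟩ := hres v List.mem_cons_self
    rw [List.foldl_cons, ih (fun w hw => hres w (List.mem_cons_of_mem v hw)),
        dic_digit v h0 h15, List.map_cons]
    simp

theorem compute_eq_alt (s : String) : compute s = compute_alt s := by
  simp only [compute, compute_alt]
  rw [PySem.List.foldl_pyRange_zero_pyGetD' s.toList ' ' computeStep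
      ([0, 0, 0, 0, 0, 0, 0, 0, 0, 0], 0, 1)]
  rw [PySem.List.foldl_pyRange_zero_pyGetD'
      (s.toList.foldl computeStep ([0, 0, 0, 0, 0, 0, 0, 0, 0, 0], 0, 1)).1 0
      (fun out v => out ++ PySem.List.pyGetD
        [['0'], ['1'], ['2'], ['3'], ['4'], ['5'], ['6'], ['7'], ['8'], ['9'],
         ['A'], ['B'], ['C'], ['D'], ['E'], ['F']] v []) []]
  rw [out_fold _ (foldl_computeStep_resOk s.toList _
      (by intro v hv; simp only [List.mem_cons, List.not_mem_nil, or_false] at hv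
          rcases hv with h | h | h | h | h | h | h | h | h | h <;> subst h <;> omega)) []]
  rw [List.nil_append]
  obtain ⟨h, tl, hsplit⟩ : ∃ h tl, s.toList.splitOn 'P' = h :: tl := by
    cases hs : s.toList.splitOn 'P' with
    | nil => exact absurd hs (List.splitOnP_ne_nil _ _)
    | cons a b => exact ⟨a, b, rfl⟩
  have hmain := (stateMachine_eq_segments s.toList).1 [0, 0, 0, 0, 0, 0, 0, 0, 0, 0] 0
  rw [show min (0 : Int) 9 = 0 by omega] at hmain
  rw [hmain, hsplit]
  simp

-- ===== VERDICT (by name: the statement is the Claim_ definition above) =====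
theorem compute_spec : Claim_equal_compute := by
  intro s _
  unfold Spec_compute
  exact compute_eq_alt s
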